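-- pv_equiv track=rewrite | github.com/onurdenizs/progress-report-dec-2024 | scripts/preprocess/swiss_line_station_extractor.py | extract_ordered_stations
-- ===== SOURCE A (Python) =====
-- def extract_ordered_stations(segments, known_stations):
--     """
--     Extract ordered stations for the given linienr by traversing line segments.
--
--     Args:
--         segments (list): Filtered GeoJSON features for the linienr.
--         known_stations (list): List containing the origin and destination stations.
--
--     Returns:
--         list: Ordered list of stations for the linienr, formatted for direct use in VEHICLE_ROUTES.
--     """
--     origin = known_stations[0]
--     destination = known_stations[-1]
--
--     # Initialize traversal
--     current_station = origin
--     ordered_stations = [current_station]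
--     remaining_segments = segments.copy()
--
--     while current_station != destination:
--         # Find the next segment starting from the current station
--         next_segment = next(
--             (seg for seg in remaining_segments if seg["properties"]["bp_anfang"] == current_station),
--             None
--         )
--
--         if not next_segment:
--             raise ValueError(f"No next segment found starting from {current_station}. Check data consistency.")
--
--         # Add the ending station of the found segment
--         next_station = next_segment["properties"]["bp_ende"]
--         ordered_stations.append(next_station)
--
--         # Update current station and remove the used segment
--         current_station = next_station
--         remaining_segments.remove(next_segment)
--
--     # Format for direct use in VEHICLE_ROUTES
--     return [f'"{station}"' for station in ordered_stations]
-- ===== SOURCE B (Python) =====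
-- def extract_ordered_stations(segments, known_stations):
--     """Index segments by start station once (queues in reverse order so pop()
--     yields the earliest remaining segment), then follow the chain by
--     dict lookup instead of rescanning the remaining-segments list each step."""
--     origin = known_stations[0]
--     destination = known_stations[-1]
--
--     index = {}
--     for seg in reversed(segments):
--         props = seg.get("properties", {})
--         start = props.get("bp_anfang")
--         end = props.get("bp_ende")
--         if start is not None and end is not None:
--             index.setdefault(start, []).append(end)
--
--     ordered_stations = [origin]
--     current_station = origin
--     while current_station != destination:
--         queue = index.get(current_station)
--         if not queue:
--             raise ValueError(f"No next segment found starting from {current_station}. Check data consistency.")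
--         current_station = queue.pop()
--         ordered_stations.append(current_station)
--
--     return [f'"{station}"' for station in ordered_stations]
-- ===== Notes on version B (the rewrite author's own statement) =====
-- stated objective: alternative
-- what changed: B builds a dict of per-start-station end queues once (iterating the segments in reverse so pop() yields the earliest remaining segment) and follows the chain with dict lookups, instead of A's per-step linear rescan of the remaining-segments list plus list.remove(); asymptotically O(n) vs A's worst-case O(n^2), though in a timing run A's scan always hits immediately, so no measured speed-up is claimed.
import Mathlib
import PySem

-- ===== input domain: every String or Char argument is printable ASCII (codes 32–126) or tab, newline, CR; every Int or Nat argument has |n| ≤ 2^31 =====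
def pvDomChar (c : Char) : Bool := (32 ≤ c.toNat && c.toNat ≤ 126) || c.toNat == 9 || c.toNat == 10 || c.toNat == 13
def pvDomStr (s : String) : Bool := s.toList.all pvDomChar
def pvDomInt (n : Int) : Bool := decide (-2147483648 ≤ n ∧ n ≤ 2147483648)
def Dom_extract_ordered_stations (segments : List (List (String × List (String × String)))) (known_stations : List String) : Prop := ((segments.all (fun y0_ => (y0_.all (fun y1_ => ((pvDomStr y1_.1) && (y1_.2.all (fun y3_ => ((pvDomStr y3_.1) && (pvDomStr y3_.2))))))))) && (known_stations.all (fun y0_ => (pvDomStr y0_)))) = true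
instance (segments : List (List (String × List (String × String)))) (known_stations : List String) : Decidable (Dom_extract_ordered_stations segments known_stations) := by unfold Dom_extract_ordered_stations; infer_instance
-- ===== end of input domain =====

-- B replaces A's per-step linear rescans (and list.remove) of the remaining segments by a dict of
-- per-start-station queues built once, then follows the chain by dict lookup (objective: alternative).
-- A's list.remove() only mutates A's local copy of `segments`; neither version mutates its arguments.

-- ===== PORT A =====
-- A's `next(seg for seg in remaining if seg["properties"]["bp_anfang"] == cur)`:
-- scans in order; `none` where Python raises (KeyError while scanning, bp_ende KeyError on the
-- match, or no match = the ValueError).  On success returns the match's bp_ende and the remaining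
-- list with the matched segment removed (Python's .remove removes exactly that first match).
def pvFindNextA (remaining : List (List (String × List (String × String)))) (cur : String) :
    Option (String × List (List (String × List (String × String)))) :=
  match remaining with
  | [] => none
  | seg :: rest =>
    match seg.lookup "properties" with
    | none => none
    | some props =>
      match props.lookup "bp_anfang" with
      | none => none
      | some a =>
        if a = cur then
          match props.lookup "bp_ende" with
          | none => none
          | some e => some (e, rest)
        else
          match pvFindNextA rest cur with
          | none => none
          | some (e, rem) => some (e, seg :: rem)

theorem pvFindNextA_length (remaining : List (List (String × List (String × String))))
    (cur : String) (e : String) (rem : List (List (String × List (String × String))))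
    (h : pvFindNextA remaining cur = some (e, rem)) : rem.length < remaining.length := by
  induction remaining generalizing e rem with
  | nil => simp [pvFindNextA] at h
  | cons seg rest ih =>
    simp only [pvFindNextA] at h
    split at h
    · simp at h
    split at h
    · simp at h
    split at h
    · split at h
      · simp at h
      · simp only [Option.some.injEq, Prod.mk.injEq] at h
        cases h.2
        simp
    · split at h
      · simp at h
      next e' rem' heq =>
        simp only [Option.some.injEq, Prod.mk.injEq] at h
        cases h.2
        simpa using ih e' rem' heq

-- A's while-loop: ordered_stations accumulates; stops at destination; `acc` returned unchanged on
-- the branches where Python raises (those inputs are outside Pre_).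
def pvLoopA (remaining : List (List (String × List (String × String))))
    (cur dest : String) (acc : List String) : List String :=
  if cur = dest then acc
  else
    match h : pvFindNextA remaining cur with
    | none => acc
    | some (e, rem) => pvLoopA rem e dest (acc ++ [e])
termination_by remaining.length
decreasing_by exact pvFindNextA_length _ _ _ _ h

def extract_ordered_stations (segments : List (List (String × List (String × String)))) (known_stations : List String) : List String :=
  match PySem.List.pyGet? known_stations 0, PySem.List.pyGet? known_stations (-1) with
  | some origin, some destination =>
      (pvLoopA segments origin destination [origin]).map (fun station => "\"" ++ station ++ "\"")
  | _, _ => []  -- IndexError on empty known_stations; outside Pre_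

-- ===== PORT B =====
-- index.setdefault(start, []).append(end) over reversed(segments), skipping segments without keys.
def pvIndexB (segments : List (List (String × List (String × String)))) :
    PySem.Dict String (List String) :=
  segments.reverse.foldl (fun d seg =>
    let props := (seg.lookup "properties").getD []
    match props.lookup "bp_anfang" with
    | none => d
    | some start =>
      match props.lookup "bp_ende" with
      | none => d
      | some «end» => d.modify start [] (fun q => q ++ [«end»])) PySem.Dict.empty

-- B's while-loop; queue.pop() takes the last element (= earliest segment, queues were built in
-- reverse).  `fuel` is a totality guard only: each pass pops one element, and the run from
-- extract_ordered_stations_alt starts with more fuel than segments exist, so 0 is never reached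
-- on any input where the Python returns; `acc` is returned where Python B raises its ValueError.
def pvLoopB (fuel : Nat) (d : PySem.Dict String (List String))
    (cur dest : String) (acc : List String) : List String :=
  match fuel with
  | 0 => acc
  | fuel + 1 =>
    if cur = dest then acc
    else
      match PySem.Dict.get? d cur with
      | none => acc
      | some [] => acc
      | some (x :: xs) =>
        let e := (x :: xs).getLast (List.cons_ne_nil x xs)
        pvLoopB fuel (d.insert cur ((x :: xs).dropLast)) e dest (acc ++ [e])

def extract_ordered_stations_alt (segments : List (List (String × List (String × String)))) (known_stations : List String) : List String :=
  -- origin = known_stations[0]; destination = known_stations[-1]; none = IndexError, outside Pre_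
  (((PySem.List.pyGet? known_stations 0).bind (fun origin =>
    (PySem.List.pyGet? known_stations (-1)).map (fun destination =>
      (pvLoopB (segments.length + 1) (pvIndexB segments) origin destination [origin]).map
        (fun station => "\"" ++ station ++ "\""))))).getD []

-- ===== PRECONDITION & SPEC =====
-- Pre_-side scan: succeeds with the bp_ende of the first remaining segment whose (readable)
-- bp_anfang equals cur, and the remaining list without it; `none` exactly where A's generator
-- raises a KeyError or finds no match.  Deliberately phrased with getD/Option.map (not a copy of
-- the port's code); pvScan_eq_findNextA below proves it agrees with A's scan.
def pvScan (remaining : List (List (String × List (String × String)))) (cur : String) :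
    Option (String × List (List (String × List (String × String)))) :=
  match remaining with
  | [] => none
  | seg :: rest =>
    let props := (seg.lookup "properties").getD []
    match props.lookup "bp_anfang" with
    | none => none
    | some a =>
      if a = cur then (props.lookup "bp_ende").map (fun e => (e, rest))
      else (pvScan rest cur).map (fun p => (p.1, seg :: p.2))

-- True exactly when A's greedy first-match traversal reaches `dest` with every scanned segment
-- carrying its properties/bp_anfang/bp_ende keys — i.e. exactly where Python A returns instead
-- of raising (A's ValueError/KeyError depend on reachability, so no smaller closed form exists).
-- `fuel` only makes the recursion structural: each step removes one segment, so
-- segments.length + 1 (as passed by Pre_) never runs out.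
def pvGreedy (fuel : Nat) (remaining : List (List (String × List (String × String))))
    (cur dest : String) : Bool :=
  match fuel with
  | 0 => false
  | fuel + 1 =>
    if cur = dest then true
    else
      match pvScan remaining cur with
      | none => false
      | some (e, rem) => pvGreedy fuel rem e dest

-- Pre_ excludes exactly the inputs where Python A raises: empty known_stations (IndexError),
-- a scanned segment without the needed keys (KeyError), or a dead end (ValueError).
def Pre_extract_ordered_stations (segments : List (List (String × List (String × String)))) (known_stations : List String) : Prop :=
  known_stations ≠ [] ∧ pvGreedy (segments.length + 1) segments known_stations.headI known_stations.getLastI = true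
instance (segments : List (List (String × List (String × String)))) (known_stations : List String) : Decidable (Pre_extract_ordered_stations segments known_stations) := by unfold Pre_extract_ordered_stations; infer_instance

def pvWitness_extract_ordered_stations : (List (List (String × List (String × String)))) × List String :=
  ([[("properties", [("bp_anfang", "A"), ("bp_ende", "B")])],
    [("properties", [("bp_anfang", "B"), ("bp_ende", "C")])]], ["A", "C"])

def Spec_extract_ordered_stations (segments : List (List (String × List (String × String)))) (known_stations : List String) (out : List String) : Prop := out = extract_ordered_stations_alt segments known_stations
instance (segments : List (List (String × List (String × String)))) (known_stations : List String) (out : List String) : Decidable (Spec_extract_ordered_stations segments known_stations out) := by unfold Spec_extract_ordered_stations; infer_instance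

-- ===== CLAIM (what is proved, stated in full; the proofs are below) =====
def Claim_equal_extract_ordered_stations : Prop := ∀ (segments : List (List (String × List (String × String)))) (known_stations : List String), Dom_extract_ordered_stations segments known_stations → Pre_extract_ordered_stations segments known_stations → Spec_extract_ordered_stations segments known_stations (extract_ordered_stations segments known_stations)

-- ===== LEMMAS AND PROOFS =====

-- The bp_anfang/bp_ende pair of a segment, `none` if either key is missing.
def pvSegKey (seg : List (String × List (String × String))) : Option (String × String) :=
  let props := (seg.lookup "properties").getD []
  match props.lookup "bp_anfang", props.lookup "bp_ende" with
  | some a, some e => some (a, e)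
  | _, _ => none

-- bp_ende's of the well-keyed segments starting at s, in list order.
def pvEnds (remaining : List (List (String × List (String × String)))) (s : String) : List String :=
  remaining.filterMap (fun seg =>
    match pvSegKey seg with
    | some (a, e) => if a = s then some e else none
    | none => none)

theorem pvEnds_cons (seg : List (String × List (String × String)))
    (l : List (List (String × List (String × String)))) (s : String) :
    pvEnds (seg :: l) s =
      (match pvSegKey seg with
       | some (a, e) => if a = s then [e] else []
       | none => []) ++ pvEnds l s := by
  simp only [pvEnds, List.filterMap_cons]
  rcases hk : pvSegKey seg with _ | ⟨a, e⟩
  · rfl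
  · by_cases has : a = s <;> simp [has]

-- B's index step is the modify-step driven by pvSegKey.
theorem pvIndexB_step_eq :
    (fun (d : PySem.Dict String (List String)) (seg : List (String × List (String × String))) =>
      let props := (seg.lookup "properties").getD []
      match props.lookup "bp_anfang" with
      | none => d
      | some start =>
        match props.lookup "bp_ende" with
        | none => d
        | some «end» => d.modify start [] (fun q => q ++ [«end»]))
    = (fun d seg =>
      match pvSegKey seg with
      | some p => d.modify p.1 [] (fun q => q ++ [p.2])
      | none => d) := by
  funext d seg
  simp only [pvSegKey]
  rcases ((seg.lookup "properties").getD []).lookup "bp_anfang" with _ | a <;>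
    rcases ((seg.lookup "properties").getD []).lookup "bp_ende" with _ | e <;> rfl

-- B's index fold skips the segments pvSegKey maps to none: it is the modify-fold over
-- the filterMap.
theorem pvFoldl_skip (l : List (List (String × List (String × String))))
    (d : PySem.Dict String (List String)) :
    l.foldl (fun d seg =>
      match pvSegKey seg with
      | some p => d.modify p.1 [] (fun q => q ++ [p.2])
      | none => d) d
      = (l.filterMap pvSegKey).foldl (fun d p => d.modify p.1 [] (fun q => q ++ [p.2])) d := by
  induction l generalizing d with
  | nil => rfl
  | cons x xs ih =>
    simp only [List.foldl_cons, List.filterMap_cons]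
    rcases hx : pvSegKey x with _ | p <;> simp [ih]

theorem pvEnds_factored (l : List (List (String × List (String × String)))) (s : String) :
    pvEnds l s = ((l.filterMap pvSegKey).filter (fun p => p.1 == s)).map (fun p => p.2) := by
  induction l with
  | nil => rfl
  | cons seg rest ih =>
    rw [pvEnds_cons, ih, List.filterMap_cons]
    rcases hk : pvSegKey seg with _ | ⟨a, e⟩
    · rfl
    · by_cases has : a = s <;> simp [has]

-- The invariant at entry: each queue of B's index is the (reversed) list of ends of the
-- well-keyed segments starting there.
theorem pvIndexB_getD (segments : List (List (String × List (String × String)))) (s : String) :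
    (pvIndexB segments).getD s [] = (pvEnds segments s).reverse := by
  unfold pvIndexB
  rw [pvIndexB_step_eq, pvFoldl_skip]
  rw [PySem.Dict.getD_foldl_modify_append, PySem.Dict.getD_empty]
  rw [List.filterMap_reverse, List.filter_reverse, List.map_reverse, pvEnds_factored]
  simp

-- One successful scan of A: it pops exactly the head of the cur-queue and leaves every
-- other station's queue unchanged.
theorem pvFindNextA_ends (remaining : List (List (String × List (String × String))))
    (cur : String) (e : String) (rem : List (List (String × List (String × String))))
    (h : pvFindNextA remaining cur = some (e, rem)) :
    pvEnds remaining cur = e :: pvEnds rem cur ∧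
      ∀ s, s ≠ cur → pvEnds remaining s = pvEnds rem s := by
  induction remaining generalizing e rem with
  | nil => simp [pvFindNextA] at h
  | cons seg rest ih =>
    simp only [pvFindNextA] at h
    split at h
    · simp at h
    next props hp =>
      split at h
      · simp at h
      next a ha =>
        split at h
        next hac =>
          split at h
          · simp at h
          next e' he =>
            simp only [Option.some.injEq, Prod.mk.injEq] at h
            obtain ⟨rfl, rfl⟩ := h
            have hk : pvSegKey seg = some (a, e') := by
              simp [pvSegKey, hp, ha, he]
            constructor
            · rw [pvEnds_cons, hk]; simp [hac]
            · intro s hs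
              rw [pvEnds_cons, hk]
              have has : a ≠ s := by rw [hac]; exact Ne.symm hs
              simp [has]
        next hac =>
          split at h
          · simp at h
          next e' rem' hr =>
            simp only [Option.some.injEq, Prod.mk.injEq] at h
            obtain ⟨rfl, rfl⟩ := h
            obtain ⟨ih1, ih2⟩ := ih e' rem' hr
            have hkey : pvSegKey seg = none ∨ ∃ x, pvSegKey seg = some (a, x) := by
              simp only [pvSegKey, hp, Option.getD_some, ha]
              rcases props.lookup "bp_ende" with _ | x
              · exact Or.inl rfl
              · exact Or.inr ⟨x, rfl⟩
            have hhead : ∀ s, a ≠ s →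
                (match pvSegKey seg with
                 | some (a, e) => if a = s then [e] else []
                 | none => ([] : List String)) = [] := by
              intro s has
              rcases hkey with hk | ⟨x, hk⟩ <;> simp [hk, has]
            constructor
            · rw [pvEnds_cons, pvEnds_cons, hhead cur hac, ih1]
              rfl
            · intro s hs
              by_cases has : a = s
              · rw [pvEnds_cons, pvEnds_cons, ih2 s hs]
              · rw [pvEnds_cons, pvEnds_cons, hhead s has, ih2 s hs]

-- The Pre_-side scan agrees with A's scan everywhere.
theorem pvScan_eq_findNextA (remaining : List (List (String × List (String × String))))
    (cur : String) : pvScan remaining cur = pvFindNextA remaining cur := by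
  induction remaining with
  | nil => rfl
  | cons seg rest ih =>
    simp only [pvScan, pvFindNextA]
    cases hp : seg.lookup "properties" with
    | none => simp
    | some props =>
      simp only [Option.getD_some]
      cases ha : props.lookup "bp_anfang" with
      | none => rfl
      | some a =>
        by_cases hac : a = cur
        · simp only [if_pos hac]
          cases he : props.lookup "bp_ende" with
          | none => rfl
          | some e => rfl
        · simp only [if_neg hac]
          rw [ih]
          cases hr : pvFindNextA rest cur with
          | none => rfl
          | some p => rfl

-- Main loop equivalence: if A's traversal succeeds and B's index agrees with the remaining
-- segments (queues reversed), the two loops produce the same station list.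
theorem pvLoop_eq (fuel : Nat) :
    ∀ (remaining : List (List (String × List (String × String))))
      (cur dest : String) (acc : List String) (d : PySem.Dict String (List String)),
      remaining.length < fuel →
      pvGreedy fuel remaining cur dest = true →
      (∀ s, d.getD s [] = (pvEnds remaining s).reverse) →
      pvLoopA remaining cur dest acc = pvLoopB fuel d cur dest acc := by
  induction fuel with
  | zero => intro remaining _ _ _ _ hlt; omega
  | succ n ih =>
    intro remaining cur dest acc d hlt hg hinv
    by_cases hcd : cur = dest
    · rw [pvLoopA, pvLoopB]
      simp [hcd]
    · rw [pvGreedy, if_neg hcd] at hg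
      split at hg
      · exact absurd hg (by simp)
      next e rem hscan =>
        have hA : pvFindNextA remaining cur = some (e, rem) :=
          pvScan_eq_findNextA remaining cur ▸ hscan
        obtain ⟨hcur, hoth⟩ := pvFindNextA_ends remaining cur e rem hA
        have hq : d.get? cur = some ((pvEnds rem cur).reverse ++ [e]) := by
          have h1 : d.getD cur [] = (pvEnds rem cur).reverse ++ [e] := by
            rw [hinv cur, hcur]; simp
          rw [PySem.Dict.getD_eq_get?_getD] at h1
          cases hg' : d.get? cur with
          | none => rw [hg'] at h1; simp at h1
          | some q => rw [hg'] at h1; simp at h1; rw [h1]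
        -- A side
        rw [pvLoopA, if_neg hcd]
        split
        next hnone => rw [hA] at hnone; exact absurd hnone (by simp)
        next e' rem' hsome =>
          rw [hA] at hsome
          simp only [Option.some.injEq, Prod.mk.injEq] at hsome
          obtain ⟨rfl, rfl⟩ := hsome
          -- B side
          rw [pvLoopB, if_neg hcd]
          split
          next hnone => rw [hq] at hnone; simp at hnone
          next hnil => rw [hq] at hnil; simp at hnil
          next x xs hcons =>
            rw [hq] at hcons
            simp only [Option.some.injEq] at hcons
            have hlast : (x :: xs).getLast (List.cons_ne_nil x xs) = e := by
              have h1 : (x :: xs).getLast? = some e := by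
                rw [← hcons]; exact List.getLast?_concat
              rw [List.getLast?_eq_some_getLast (List.cons_ne_nil x xs)] at h1
              exact Option.some.inj h1
            have hdrop : (x :: xs).dropLast = (pvEnds rem cur).reverse := by
              rw [← hcons]; exact List.dropLast_concat
            rw [hlast, hdrop]
            apply ih rem e dest (acc ++ [e]) (d.insert cur (pvEnds rem cur).reverse)
            · have := pvFindNextA_length remaining cur e rem hA; omega
            · exact hg
            · intro s
              by_cases hs : s = cur
              · subst hs
                rw [PySem.Dict.getD_insert_self]
              · rw [PySem.Dict.getD_insert_of_ne d _ _ hs, hinv s, hoth s hs]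

-- ===== VERDICT (by name: the statement is the Claim_ definition above) =====
theorem extract_ordered_stations_spec : Claim_equal_extract_ordered_stations := by
  intro segments known_stations _ hpre
  obtain ⟨hne, hg⟩ := hpre
  unfold Spec_extract_ordered_stations extract_ordered_stations extract_ordered_stations_alt
  cases known_stations with
  | nil => exact absurd rfl hne
  | cons o rest =>
    have h0 : PySem.List.pyGet? (o :: rest) 0 = some (o :: rest).headI := by
      rw [PySem.List.pyGet?_zero]; rfl
    obtain ⟨dst, hdst⟩ : ∃ dst, (o :: rest).getLast? = some dst := by
      cases h : (o :: rest).getLast? with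
      | none => exact absurd (List.getLast?_eq_none_iff.mp h) (by simp)
      | some dst => exact ⟨dst, rfl⟩
    have h1 : PySem.List.pyGet? (o :: rest) (-1) = some (o :: rest).getLastI := by
      rw [PySem.List.pyGet?_neg_one, hdst, List.getLastI_eq_getLast?_getD, hdst]; rfl
    rw [h0, h1]
    have hloop := pvLoop_eq (segments.length + 1) segments (o :: rest).headI
      (o :: rest).getLastI [(o :: rest).headI] (pvIndexB segments)
      (by omega) hg (fun s => pvIndexB_getD segments s)
    exact congrArg (List.map (fun station => "\"" ++ station ++ "\"")) hloop
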